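-- pv_equiv track=rewrite | github.com/red-sprout/mechanicalEng | 9th_week/9-3.py | DP
-- ===== SOURCE A (Python) =====
-- T = [1,0,3]+[0 for _ in range(100)]
--
-- def DP(N):
--     if N <= 2:
--         return T[N]
--     if N%2 != 0:
--         return 0
--     result = 0
--     for i in range(0,N-1,2):
--         if i == N-2:
--             result += 3*DP(i)
--         else:
--             result += 2*DP(i)
--     T[N] = result
--     return T[N]
-- ===== SOURCE B (Python) =====
-- def DP(N):
--     # Even-index values satisfy a second-order linear recurrence (coefficients 4 and -1); odd N gives 0.
--     # g(k) is the first-row sum of [[4,-1],[1,0]]^k, computed by squaring.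
--     if N % 2 != 0:
--         return 0
--     k = N // 2
--     a, b, c, d = 1, 0, 0, 1          # accumulator = identity matrix
--     pa, pb, pc, pd = 4, -1, 1, 0     # p = [[4,-1],[1,0]]
--     while k > 0:
--         if k % 2 == 1:
--             a, b, c, d = a*pa + b*pc, a*pb + b*pd, c*pa + d*pc, c*pb + d*pd
--         pa, pb, pc, pd = pa*pa + pb*pc, pa*pb + pb*pd, pc*pa + pd*pc, pc*pb + pd*pd
--         k //= 2
--     return a + b
-- ===== Notes on version B (the rewrite author's own statement) =====
-- stated objective: alternative
-- what changed: Replaced the exponential recursion (which re-sums all smaller even values and never reads its memo back) by exponentiation-by-squaring of the companion matrix of the second-order linear recurrence (coefficients 4 and -1) that the even-index values satisfy.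
-- outside the precondition, e.g. on DP(-2): A returns 0, B returns 1; on DP(-200): A raises IndexError, B returns 1
import Mathlib
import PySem

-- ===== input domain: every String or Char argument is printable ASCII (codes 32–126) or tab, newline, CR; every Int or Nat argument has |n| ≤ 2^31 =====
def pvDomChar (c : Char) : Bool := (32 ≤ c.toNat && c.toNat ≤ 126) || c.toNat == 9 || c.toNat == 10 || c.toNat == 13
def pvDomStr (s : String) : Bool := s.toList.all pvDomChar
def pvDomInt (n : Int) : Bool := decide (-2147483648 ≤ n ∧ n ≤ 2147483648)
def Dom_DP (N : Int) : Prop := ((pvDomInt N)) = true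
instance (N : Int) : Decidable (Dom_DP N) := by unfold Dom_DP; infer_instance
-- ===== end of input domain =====

-- B replaces A's exponential recursion by exponentiation-by-squaring of the companion
-- matrix of the second-order linear recurrence, with coefficients 4 and -1, that the
-- even-index values satisfy (objective: alternative algorithm).
-- A mutates the module-level table T in place (memo writes it never reads back for the
-- result); the equivalence proved here is about the RETURN value only.

-- ===== PORT A =====
-- the module-level table T = [1,0,3] + [0]*100
def pvT : List Int := [1, 0, 3] ++ List.replicate 100 0

-- fuel only makes the recursion structural; for 0 ≤ N, fuel N.toNat+1 always suffices
-- (each recursive call drops N by at least 2 while fuel drops by 1).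
-- '(….getD 0)': pyGet? = none is Python's IndexError (N < -103), excluded by Pre_DP.
def DPf : Nat → Int → Int
  | 0, _ => 0
  | fuel+1, N =>
    if N ≤ 2 then (PySem.List.pyGet? pvT N).getD 0
    else if PySem.Int.mod N 2 ≠ 0 then 0
    else
      List.foldl
        (fun result i =>
          if i == N - 2 then result + 3 * DPf fuel i else result + 2 * DPf fuel i)
        0 (PySem.List.pyRange 0 (N - 1) 2)

def DP (N : Int) : Int := DPf (N.toNat + 1) N

-- ===== PORT B =====
-- 2x2 matrix product, tuples in row-major order (a, b, c, d) = [[a, b], [c, d]]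
def mmul (x y : Int × Int × Int × Int) : Int × Int × Int × Int :=
  (x.1 * y.1 + x.2.1 * y.2.2.1, x.1 * y.2.1 + x.2.1 * y.2.2.2,
   x.2.2.1 * y.1 + x.2.2.2 * y.2.2.1, x.2.2.1 * y.2.1 + x.2.2.2 * y.2.2.2)

-- Source B's 'while k > 0' squaring loop
def dpLoop (k : Int) (acc p : Int × Int × Int × Int) : Int × Int × Int × Int :=
  if _h : 0 < k then
    dpLoop (PySem.Int.floordiv k 2)
      (if PySem.Int.mod k 2 = 1 then mmul acc p else acc) (mmul p p)
  else acc
termination_by k.toNat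
decreasing_by
  rw [PySem.Int.floordiv_eq_ediv_of_pos (by norm_num : (0:Int) < 2)]
  omega

def DP_alt (N : Int) : Int :=
  if PySem.Int.mod N 2 ≠ 0 then 0
  else
    let r := dpLoop (PySem.Int.floordiv N 2) (1, 0, 0, 1) (4, -1, 1, 0)
    r.1 + r.2.1

-- ===== PRECONDITION & SPEC =====
-- Pre_ excludes negative N: there A raises IndexError (N < -103) or returns a value
-- produced by accidental negative-index wraparound into the mutable global table T.
def Pre_DP (N : Int) : Prop := 0 ≤ N
instance (N : Int) : Decidable (Pre_DP N) := by unfold Pre_DP; infer_instance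
def pvWitness_DP : Int := (8)

def Spec_DP (N : Int) (out : Int) : Prop := out = DP_alt N
instance (N : Int) (out : Int) : Decidable (Spec_DP N out) := by unfold Spec_DP; infer_instance

-- ===== CLAIM (what is proved, stated in full; the proofs are below) =====
def Claim_equal_DP : Prop := ∀ (N : Int), Dom_DP N → Pre_DP N → Spec_DP N (DP N)

-- ===== LEMMAS AND PROOFS =====

-- the common mathematical sequence: g k = DP(2k)
def g : Nat → Int
  | 0 => 1
  | 1 => 3
  | (n+2) => 4 * g (n+1) - g n

-- B-side: the Lucas-type sequence u and matrix powers of M = [[4,-1],[1,0]]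
def u : Nat → Int
  | 0 => 0
  | 1 => 1
  | (n+2) => 4 * u (n+1) - u n

def mpow (p : Int × Int × Int × Int) : Nat → Int × Int × Int × Int
  | 0 => (1, 0, 0, 1)
  | n+1 => mmul (mpow p n) p

theorem mmul_assoc (x y z : Int × Int × Int × Int) :
    mmul (mmul x y) z = mmul x (mmul y z) := by
  simp only [mmul, Prod.mk.injEq]
  refine ⟨by ring, by ring, by ring, by ring⟩

theorem mmul_id_left (x : Int × Int × Int × Int) : mmul (1, 0, 0, 1) x = x := by
  simp [mmul]

theorem mmul_id_right (x : Int × Int × Int × Int) : mmul x (1, 0, 0, 1) = x := by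
  simp [mmul]

theorem mpow_succ_left (p : Int × Int × Int × Int) (n : Nat) :
    mpow p (n + 1) = mmul p (mpow p n) := by
  induction n with
  | zero => simp [mpow, mmul_id_left, mmul_id_right]
  | succ m ih =>
    show mmul (mpow p (m + 1)) p = mmul p (mpow p (m + 1))
    conv_lhs => rw [ih]
    conv_rhs => rw [show mpow p (m + 1) = mmul (mpow p m) p from rfl]
    rw [mmul_assoc]

theorem mpow_two_mul (p : Int × Int × Int × Int) (m : Nat) :
    mpow p (2 * m) = mpow (mmul p p) m := by
  induction m with
  | zero => rfl
  | succ l ih =>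
    have h : 2 * (l + 1) = (2 * l + 1) + 1 := by ring
    rw [h]
    show mmul (mpow p (2 * l + 1)) p = mpow (mmul p p) (l + 1)
    rw [show mpow p (2 * l + 1) = mmul (mpow p (2 * l)) p from rfl, ih]
    show mmul (mmul (mpow (mmul p p) l) p) p = mmul (mpow (mmul p p) l) (mmul p p)
    rw [mmul_assoc]

theorem dpLoop_eq_mpow : ∀ (n : Nat) (k : Int), k.toNat = n →
    ∀ (acc p : Int × Int × Int × Int), dpLoop k acc p = mmul acc (mpow p k.toNat) := by
  intro n
  induction n using Nat.strong_induction_on with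
  | _ n ih =>
    intro k hk acc p
    rw [dpLoop]
    by_cases hpos : 0 < k
    · rw [dif_pos hpos]
      have hdiv : PySem.Int.floordiv k 2 = k / 2 :=
        PySem.Int.floordiv_eq_ediv_of_pos (by norm_num)
      have hmod : PySem.Int.mod k 2 = k % 2 :=
        PySem.Int.mod_eq_emod_of_pos (by norm_num)
      have hlt : (k / 2).toNat < n := by omega
      rw [hdiv, ih (k / 2).toNat (by omega) (k / 2) rfl _ (mmul p p), ← mpow_two_mul]
      by_cases hodd : k % 2 = 1
      · rw [if_pos (by rw [hmod]; exact hodd)]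
        have hsplit : k.toNat = 2 * (k / 2).toNat + 1 := by omega
        rw [hsplit, mpow_succ_left, ← mmul_assoc]
      · rw [if_neg (by rw [hmod]; exact hodd)]
        have hsplit : k.toNat = 2 * (k / 2).toNat := by omega
        rw [hsplit]
    · rw [dif_neg hpos]
      have : k.toNat = 0 := by omega
      rw [this]
      exact (mmul_id_right acc).symm

theorem mpow_M : ∀ k : Nat,
    mpow (4, -1, 1, 0) (k + 1) = (u (k + 2), -(u (k + 1)), u (k + 1), -(u k)) := by
  intro k
  induction k with
  | zero => decide
  | succ m ih =>
    show mmul (mpow (4, -1, 1, 0) (m + 1)) (4, -1, 1, 0) = _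
    rw [ih]
    simp only [mmul, Prod.mk.injEq]
    refine ⟨?_, by ring, ?_, by ring⟩
    · rw [show u (m + 1 + 2) = 4 * u (m + 2) - u (m + 1) from rfl]; ring
    · rw [show u (m + 1 + 1) = 4 * u (m + 1) - u m from rfl]; ring

theorem g_eq_u : ∀ k : Nat, g k = u (k + 1) - u k ∧ g (k + 1) = u (k + 2) - u (k + 1) := by
  intro k
  induction k with
  | zero => refine ⟨by norm_num [g, u], by norm_num [g, u]⟩
  | succ m ih =>
    refine ⟨ih.2, ?_⟩
    show g (m + 2) = u (m + 3) - u (m + 2)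
    have h1 : g (m + 2) = 4 * g (m + 1) - g m := rfl
    have h2 : u (m + 3) = 4 * u (m + 2) - u (m + 1) := rfl
    have h3 := ih.1
    have h4 := ih.2
    have h5 : u (m + 2) = 4 * u (m + 1) - u m := rfl
    omega

theorem DP_alt_even (k : Nat) : DP_alt ((2 * k : Nat) : Int) = g k := by
  unfold DP_alt
  have hmod : PySem.Int.mod ((2 * k : Nat) : Int) 2 = 0 := by
    rw [PySem.Int.mod_eq_emod_of_pos (by norm_num : (0:Int) < 2)]
    omega
  rw [if_neg (by rw [hmod]; simp)]
  have hdiv : PySem.Int.floordiv ((2 * k : Nat) : Int) 2 = (k : Int) := by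
    rw [PySem.Int.floordiv_eq_ediv_of_pos (by norm_num : (0:Int) < 2)]
    omega
  rw [hdiv, dpLoop_eq_mpow (k : Int).toNat (k : Int) rfl, mmul_id_left,
    Int.toNat_natCast]
  cases k with
  | zero => norm_num [mpow, g]
  | succ m =>
    rw [mpow_M m]
    show u (m + 2) + -(u (m + 1)) = g (m + 1)
    have := (g_eq_u m).2
    omega

-- A-side arithmetic fact: 3*g(m) + Σ_{j<m} 2*g(j) = g(m+1) for m ≥ 1
theorem g_sum (m : Nat) (hm : 1 ≤ m) :
    3 * g m + ((List.range m).map (fun j => 2 * g j)).sum = g (m + 1) := by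
  induction m with
  | zero => omega
  | succ l ih =>
    cases Nat.eq_or_lt_of_le hm with
    | inl h =>
      have : l = 0 := by omega
      subst this
      simp [g, List.range_succ]
    | inr h =>
      have hl : 1 ≤ l := by omega
      have := ih hl
      rw [List.range_succ, List.map_append, List.sum_append]
      simp only [List.map_cons, List.map_nil, List.sum_cons, List.sum_nil]
      have hrec : g (l + 2) = 4 * g (l + 1) - g l := by
        cases l with
        | zero => omega
        | succ r => simp [g]
      rw [show l + 1 + 1 = l + 2 from rfl, hrec]
      omega

theorem DPf_even : ∀ k fuel, 2 * k < fuel → DPf fuel ((2 * k : Nat) : Int) = g k := by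
  intro k
  induction k using Nat.strong_induction_on with
  | _ k ih =>
    intro fuel hfuel
    obtain ⟨f, rfl⟩ : ∃ f, fuel = f + 1 := ⟨fuel - 1, by omega⟩
    match k with
    | 0 => simp [DPf, pvT, PySem.List.pyGet?, PySem.List.pyIdx?, g]
    | 1 =>
      show DPf (f + 1) 2 = g 1
      norm_num [DPf, pvT, PySem.List.pyGet?, PySem.List.pyIdx?, g]
      decide
    | (m+2) =>
      have hN : ¬ ((2 * (m + 2) : Nat) : Int) ≤ 2 := by push_cast; omega
      have hmod : PySem.Int.mod ((2 * (m + 2) : Nat) : Int) 2 = 0 := by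
        rw [PySem.Int.mod_eq_emod_of_pos (by norm_num : (0:Int) < 2)]
        omega
      rw [DPf, if_neg hN, if_neg (by rw [hmod]; simp)]
      have hrange : PySem.List.pyRange 0 (((2 * (m + 2) : Nat) : Int) - 1) 2
          = (List.range (m + 2)).map (fun j : Nat => 2 * (j : Int)) := by
        rw [PySem.List.pyRange_of_pos _ _ (by norm_num)]
        rw [if_pos (by push_cast; omega)]
        have : ((((2 * (m + 2) : Nat) : Int) - 1 - 0 + 2 - 1) / 2).toNat = m + 2 := by
          push_cast; omega
        rw [this]
        simp only [zero_add]
      rw [hrange, List.foldl_map]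
      have hcongr : List.foldl
          (fun (result : Int) (j : Nat) =>
            if (2 * (j : Int)) == ((2 * (m + 2) : Nat) : Int) - 2 then
              result + 3 * DPf f (2 * (j : Int))
            else result + 2 * DPf f (2 * (j : Int)))
          0 (List.range (m + 2))
          = List.foldl
          (fun (result : Int) (j : Nat) =>
            result + (if j = m + 1 then 3 * g j else 2 * g j))
          0 (List.range (m + 2)) := by
        apply PySem.List.foldl_congr_mem
        intro acc j hj
        have hjlt : j < m + 2 := List.mem_range.mp hj
        have hD : DPf f (2 * (j : Int)) = g j := by
          have : (2 * (j : Int)) = ((2 * j : Nat) : Int) := by push_cast; ring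
          rw [this]
          exact ih j hjlt f (by omega)
        by_cases h : j = m + 1
        · subst h
          rw [if_pos (beq_iff_eq.mpr (by push_cast; ring)), if_pos rfl, hD]
        · rw [if_neg, if_neg h, hD]
          simp only [beq_iff_eq]
          push_cast
          omega
      rw [hcongr, PySem.List.foldl_add]
      have hsplit : List.range (m + 2) = List.range (m + 1) ++ [m + 1] := List.range_succ
      rw [hsplit, List.map_append, List.sum_append]
      have hmap : (List.range (m + 1)).map (fun j => if j = m + 1 then 3 * g j else 2 * g j)
          = (List.range (m + 1)).map (fun j => 2 * g j) := by
        apply List.map_congr_left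
        intro j hj
        have : j < m + 1 := List.mem_range.mp hj
        simp [show j ≠ m + 1 by omega]
      rw [hmap]
      simp only [List.map_cons, List.map_nil, List.sum_cons, List.sum_nil]
      rw [if_pos trivial]
      have hs := g_sum (m + 1) (by omega)
      rw [show m + 1 + 1 = m + 2 from rfl] at hs
      omega

-- ===== VERDICT (by name: the statement is the Claim_ definition above) =====
theorem DP_spec : Claim_equal_DP := by
  intro N _ hpre
  unfold Spec_DP DP
  by_cases hpar : N % 2 = 0
  · obtain ⟨k, hk⟩ : ∃ k : Nat, N = ((2 * k : Nat) : Int) := by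
      refine ⟨N.toNat / 2, ?_⟩
      have := Int.toNat_of_nonneg hpre
      push_cast
      omega
    subst hk
    rw [DP_alt_even]
    have : ((2 * k : Nat) : Int).toNat + 1 = 2 * k + 1 := by omega
    rw [this]
    exact DPf_even k (2 * k + 1) (by omega)
  · have hmod : PySem.Int.mod N 2 ≠ 0 := by
      rw [PySem.Int.mod_eq_emod_of_pos (by norm_num : (0:Int) < 2)]
      exact hpar
    have halt : DP_alt N = 0 := by unfold DP_alt; rw [if_pos hmod]
    rw [halt]
    by_cases hle : N ≤ 2
    · have hpre' : 0 ≤ N := hpre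
      have : N = 1 := by omega
      subst this
      decide
    · obtain ⟨f, hf⟩ : ∃ f, N.toNat + 1 = f + 1 := ⟨N.toNat, rfl⟩
      rw [hf, DPf, if_neg hle, if_pos hmod]
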